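-- pv_equiv track=rewrite | github.com/ykodama/codingbat_python | lucky_sum.py | lucky_sum
-- ===== SOURCE A (Python) =====
-- def lucky_sum(a, b, c):
-- 	n_sum = 0
-- 	nums = [a, b, c]
-- 	for ni in nums:
-- 		if ni != 13:
-- 			n_sum += ni
-- 		else:
-- 			break
-- 	return n_sum
-- ===== SOURCE B (Python) =====
-- def lucky_sum(a, b, c):
--     # Branch-free: cumulative "still counting" masks, multiplied into each term.
--     m1 = a != 13
--     m2 = m1 and b != 13
--     m3 = m2 and c != 13
--     return a * m1 + b * m2 + c * m3
-- ===== Notes on version B (the rewrite author's own statement) =====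
-- stated objective: alternative
-- what changed: Replaced the loop-with-break over [a,b,c] by a branch-free arithmetic formulation: cumulative boolean masks (still-counting flags) multiplied into each term and summed, with no loop, no break and no conditional control flow.
import Mathlib
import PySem

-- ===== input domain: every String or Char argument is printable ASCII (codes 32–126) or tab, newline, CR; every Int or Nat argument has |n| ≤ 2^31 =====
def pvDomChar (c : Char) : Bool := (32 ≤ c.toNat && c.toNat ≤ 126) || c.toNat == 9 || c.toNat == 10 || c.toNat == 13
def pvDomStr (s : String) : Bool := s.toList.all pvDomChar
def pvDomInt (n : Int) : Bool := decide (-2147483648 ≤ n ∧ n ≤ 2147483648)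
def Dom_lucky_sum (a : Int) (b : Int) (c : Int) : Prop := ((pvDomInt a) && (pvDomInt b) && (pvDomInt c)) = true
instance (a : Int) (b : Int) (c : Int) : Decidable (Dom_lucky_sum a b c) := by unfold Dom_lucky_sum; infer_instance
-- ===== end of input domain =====

-- B: branch-free arithmetic with cumulative boolean masks instead of A's loop with accumulator and break (alternative formulation, same cost).

-- ===== PORT A =====
-- loop over nums = [a, b, c]: add ni unless ni == 13, then break
def luckyLoop (n_sum : Int) (nums : List Int) : Int :=
  match nums with
  | [] => n_sum
  | ni :: rest => if ni ≠ 13 then luckyLoop (n_sum + ni) rest else n_sum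

def lucky_sum (a : Int) (b : Int) (c : Int) : Int :=
  luckyLoop 0 [a, b, c]

-- ===== PORT B =====
-- Python bool used as int (True = 1, False = 0)
def boolToInt (m : Bool) : Int := if m then 1 else 0

def lucky_sum_alt (a : Int) (b : Int) (c : Int) : Int :=
  let m1 : Bool := a ≠ 13
  let m2 : Bool := m1 && b ≠ 13
  let m3 : Bool := m2 && c ≠ 13
  a * boolToInt m1 + b * boolToInt m2 + c * boolToInt m3

-- ===== PRECONDITION & SPEC =====
def Spec_lucky_sum (a : Int) (b : Int) (c : Int) (out : Int) : Prop := out = lucky_sum_alt a b c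
instance (a : Int) (b : Int) (c : Int) (out : Int) : Decidable (Spec_lucky_sum a b c out) := by unfold Spec_lucky_sum; infer_instance

-- ===== CLAIM (what is proved, stated in full; the proofs are below) =====
def Claim_equal_lucky_sum : Prop := ∀ (a : Int) (b : Int) (c : Int), Dom_lucky_sum a b c → Spec_lucky_sum a b c (lucky_sum a b c)

-- ===== LEMMAS AND PROOFS =====

-- ===== VERDICT (by name: the statement is the Claim_ definition above) =====
theorem lucky_sum_spec : Claim_equal_lucky_sum := by
  intro a b c _
  simp only [Spec_lucky_sum, lucky_sum, lucky_sum_alt, luckyLoop, boolToInt]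
  by_cases ha : a = 13 <;> by_cases hb : b = 13 <;> by_cases hc : c = 13 <;>
    simp [ha, hb, hc]
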